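-- pv_equiv track=rewrite | github.com/wmatecki97/Python-Notes-Recognition | main.py | Group5Lines
-- ===== SOURCE A (Python) =====
-- def Group5Lines(list, distanceBetweenLines):
--     result =[]
--     group = []
--     for i in range(len(list)):
--         group.append(list[i])
--         if(i == len(list)-1 or abs(list[i+1]-list[i]) > distanceBetweenLines*2):
--             if(len(group) > 2):
--                 while(len(group) < 5):
--                     group.append(group[0])
--                 result.append(group)
--             group = []
--     return result
-- ===== SOURCE B (Python) =====
-- def Group5Lines(list, distanceBetweenLines):
--     d2 = distanceBetweenLines * 2
--
--     def segments(xs):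
--         if not xs:
--             return []
--         i = 1
--         while i < len(xs) and abs(xs[i] - xs[i - 1]) <= d2:
--             i += 1
--         return [xs[:i]] + segments(xs[i:])
--
--     return [s + [s[0]] * (5 - len(s)) for s in segments(list) if len(s) > 2]
-- ===== Notes on version B (the rewrite author's own statement) =====
-- stated objective: simpler
-- what changed: Instead of one stateful loop that flushes a running group at boundaries and pads with a while-loop, B first partitions the list into consecutive segments by recursion on boundary positions, then a single comprehension keeps the segments of length > 2 and pads each to length 5 by list multiplication with its first element.
import Mathlib
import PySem

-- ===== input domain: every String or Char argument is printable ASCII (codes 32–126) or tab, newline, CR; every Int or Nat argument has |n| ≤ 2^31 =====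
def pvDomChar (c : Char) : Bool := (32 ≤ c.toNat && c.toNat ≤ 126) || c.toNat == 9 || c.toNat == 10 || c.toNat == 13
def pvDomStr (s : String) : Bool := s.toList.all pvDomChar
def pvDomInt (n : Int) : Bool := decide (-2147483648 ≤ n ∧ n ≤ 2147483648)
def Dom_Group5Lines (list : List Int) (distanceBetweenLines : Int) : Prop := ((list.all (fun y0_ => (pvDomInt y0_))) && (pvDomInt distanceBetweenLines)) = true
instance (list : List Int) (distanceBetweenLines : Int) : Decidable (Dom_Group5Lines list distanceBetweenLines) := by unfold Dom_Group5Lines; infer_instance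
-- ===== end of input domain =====

-- B replaces A's stateful flush-at-boundary loop (with a while-loop padder) by a
-- partition-into-segments pass followed by a filter-and-pad map; objective: simpler.


-- ===== PORT A =====
-- A's inner while loop: append group[0] until the group has length 5.
-- group is nonempty at every call site (length > 2), so group[0] = headD 0 is exact.
def pvPadA (g : List Int) : List Int :=
  if g.length < 5 then pvPadA (g ++ [g.headD 0]) else g
termination_by 5 - g.length
decreasing_by simp; omega

-- A's for-loop over i, as structural recursion over the remaining list with the same
-- state (group, result); the lookahead list[i+1] is the head of the tail, and the
-- i == len(list)-1 case is the singleton case, so every access is in range (exact).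
def pvLoopA (d2 : Int) : List Int → List Int → List (List Int) → List (List Int)
  | [], _group, acc => acc
  | [x], group, acc =>
      let group' := group ++ [x]
      if 2 < group'.length then acc ++ [pvPadA group'] else acc
  | x :: y :: rest, group, acc =>
      let group' := group ++ [x]
      if d2 < |y - x| then
        pvLoopA d2 (y :: rest) [] (if 2 < group'.length then acc ++ [pvPadA group'] else acc)
      else
        pvLoopA d2 (y :: rest) group' acc

def Group5Lines (list : List Int) (distanceBetweenLines : Int) : List (List Int) :=
  pvLoopA (distanceBetweenLines * 2) list [] []

-- ===== PORT B =====
-- Source B's inner while loop: split off the longest chained prefix after `prev`.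
def pvChainB (d2 : Int) (prev : Int) : List Int → List Int × List Int
  | [] => ([], [])
  | y :: ys =>
      if |y - prev| ≤ d2 then
        let p := pvChainB d2 y ys
        (y :: p.1, p.2)
      else ([], y :: ys)

theorem pvChainB_snd_len (d2 prev : Int) (ys : List Int) :
    (pvChainB d2 prev ys).2.length ≤ ys.length := by
  induction ys generalizing prev with
  | nil => simp [pvChainB]
  | cons y ys ih =>
      simp only [pvChainB]
      split
      · exact Nat.le_succ_of_le (ih y)
      · simp

-- Source B's `segments`: cut the list into consecutive segments at the boundaries.
def pvSegsB (d2 : Int) : List Int → List (List Int)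
  | [] => []
  | x :: xs =>
      let p := pvChainB d2 x xs
      (x :: p.1) :: pvSegsB d2 p.2
termination_by xs => xs.length
decreasing_by simpa using Nat.lt_succ_of_le (pvChainB_snd_len _ _ _)

-- the comprehension: keep segments of length > 2, pad each with its first element
-- (s[0] = headD 0, exact: every segment is nonempty); [s[0]]*(5-len(s)) = replicate.
def Group5Lines_alt (list : List Int) (distanceBetweenLines : Int) : List (List Int) :=
  ((pvSegsB (distanceBetweenLines * 2) list).filter (fun s => 2 < s.length)).map
    (fun s => s ++ List.replicate (5 - s.length) (s.headD 0))

-- ===== CLAIM (what is proved, stated in full; the proofs are below) =====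
def Spec_Group5Lines (list : List Int) (distanceBetweenLines : Int) (out : List (List Int)) : Prop := out = Group5Lines_alt list distanceBetweenLines
instance (list : List Int) (distanceBetweenLines : Int) (out : List (List Int)) : Decidable (Spec_Group5Lines list distanceBetweenLines out) := by unfold Spec_Group5Lines; infer_instance

def Claim_equal_Group5Lines : Prop := ∀ (list : List Int) (distanceBetweenLines : Int), Dom_Group5Lines list distanceBetweenLines → Spec_Group5Lines list distanceBetweenLines (Group5Lines list distanceBetweenLines)

-- ===== LEMMAS AND PROOFS =====

theorem pvPadA_eq (n : Nat) (a : Int) (t : List Int) (h : 5 - (a :: t).length ≤ n) :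
    pvPadA (a :: t) = (a :: t) ++ List.replicate (5 - (a :: t).length) a := by
  induction n generalizing t with
  | zero =>
      have h5 : ¬ (a :: t).length < 5 := by simp at h ⊢; omega
      rw [pvPadA, if_neg h5, Nat.sub_eq_zero_of_le (Nat.le_of_not_lt h5)]
      simp
  | succ n ih =>
      by_cases h5 : (a :: t).length < 5
      · rw [pvPadA, if_pos h5]
        simp only [List.headD_cons]
        have hcons : (a :: t) ++ [a] = a :: (t ++ [a]) := by simp
        have hn : 5 - (a :: (t ++ [a])).length ≤ n := by
          simp only [List.length_cons, List.length_append, List.length_cons,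
            List.length_nil] at h5 h ⊢
          omega
        rw [hcons, ih (t ++ [a]) hn]
        have hl : 5 - (a :: t).length = (5 - (a :: (t ++ [a])).length) + 1 := by
          simp only [List.length_cons, List.length_append, List.length_cons,
            List.length_nil] at h5 ⊢
          omega
        rw [hl, List.replicate_succ]
        simp
      · rw [pvPadA, if_neg h5, Nat.sub_eq_zero_of_le (Nat.le_of_not_lt h5)]
        simp

theorem pvLoopA_chain (d2 : Int) (xs : List Int) (x : Int) (group : List Int)
    (acc : List (List Int)) :
    pvLoopA d2 (x :: xs) group acc =
      pvLoopA d2 (pvChainB d2 x xs).2 []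
        (if 2 < (group ++ x :: (pvChainB d2 x xs).1).length then
          acc ++ [pvPadA (group ++ x :: (pvChainB d2 x xs).1)] else acc) := by
  induction xs generalizing x group with
  | nil => simp [pvLoopA, pvChainB]
  | cons y ys ih =>
      by_cases hb : d2 < |y - x|
      · have hle : ¬ |y - x| ≤ d2 := by omega
        simp [pvLoopA, pvChainB, hb, hle]
      · have hle : |y - x| ≤ d2 := by omega
        simp only [pvLoopA, pvChainB, hb, if_false, hle, if_true]
        rw [ih y (group ++ [x])]
        simp

theorem pvLoopA_segs (d2 : Int) (n : Nat) (xs : List Int) (acc : List (List Int))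
    (h : xs.length ≤ n) :
    pvLoopA d2 xs [] acc =
      acc ++ ((pvSegsB d2 xs).filter (fun s => 2 < s.length)).map
        (fun s => s ++ List.replicate (5 - s.length) (s.headD 0)) := by
  induction n generalizing xs acc with
  | zero =>
      have : xs = [] := List.eq_nil_of_length_eq_zero (Nat.le_zero.mp h)
      simp [this, pvLoopA, pvSegsB]
  | succ n ih =>
      cases xs with
      | nil => simp [pvLoopA, pvSegsB]
      | cons x xs =>
          rw [pvLoopA_chain]
          simp only [List.nil_append]
          have hlen : (pvChainB d2 x xs).2.length ≤ n := by
            have := pvChainB_snd_len d2 x xs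
            simp at h; omega
          by_cases hk : 2 < (x :: (pvChainB d2 x xs).1).length
          · rw [if_pos hk, ih _ _ hlen,
              pvPadA_eq 5 x (pvChainB d2 x xs).1 (by omega)]
            have hk' : 2 ≤ (pvChainB d2 x xs).1.length := by simp at hk; omega
            simp only [pvSegsB]
            simp [hk']
          · rw [if_neg hk, ih _ _ hlen]
            have hk' : ¬ 2 ≤ (pvChainB d2 x xs).1.length := by simp at hk; omega
            simp only [pvSegsB]
            simp [hk']

-- ===== VERDICT (by name: the statement is the Claim_ definition above) =====
theorem Group5Lines_spec : Claim_equal_Group5Lines := by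
  intro list d _hdom
  unfold Spec_Group5Lines Group5Lines Group5Lines_alt
  rw [pvLoopA_segs (d * 2) list.length list [] (Nat.le_refl _)]
  simp
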